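-- pv_equiv track=rewrite | github.com/geodimitrov/Python-Advanced-SoftUni | File-Handling/Exercises/02. line_numbers.py | count_letters_and_punctuation
-- ===== SOURCE A (Python) =====
-- def count_letters_and_punctuation(line):
--     letters = 0
--     punc = 0
--
--     for char in line:
--         if char.isalpha():
--             letters += 1
--
--         elif char in punc_marks:
--             punc += 1
--
--     return letters, punc
--
-- punc_marks = ['!', "," ,"\'" ,";" ,"\"", ".", "-" ,"?" ]
-- ===== SOURCE B (Python) =====
-- PUNC_MARKS = {'!', ',', "'", ';', '"', '.', '-', '?'}
--
--
-- def count_letters_and_punctuation(line):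
--     freq = {}
--     for ch in line:
--         freq[ch] = freq.get(ch, 0) + 1
--     letters = sum(n for ch, n in freq.items() if ch.isalpha())
--     punc = sum(n for ch, n in freq.items() if ch in PUNC_MARKS)
--     return letters, punc
-- ===== Notes on version B (the rewrite author's own statement) =====
-- stated objective: alternative
-- what changed: B builds a frequency table of the line first and then aggregates letter and punctuation totals over the distinct characters, instead of A's per-character if/elif scan; the elif disappears because letters and punctuation marks are disjoint.
import Mathlib
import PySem

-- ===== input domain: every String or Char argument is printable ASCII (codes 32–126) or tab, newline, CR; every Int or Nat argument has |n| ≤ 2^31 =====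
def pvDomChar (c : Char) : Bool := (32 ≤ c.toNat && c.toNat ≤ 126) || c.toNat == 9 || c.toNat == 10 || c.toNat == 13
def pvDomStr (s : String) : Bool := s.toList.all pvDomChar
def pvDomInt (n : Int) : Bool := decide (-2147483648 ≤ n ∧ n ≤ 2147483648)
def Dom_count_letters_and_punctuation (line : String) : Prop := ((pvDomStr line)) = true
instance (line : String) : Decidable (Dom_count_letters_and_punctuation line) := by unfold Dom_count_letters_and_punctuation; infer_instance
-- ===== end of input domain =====

-- B replaces A's per-character if/elif scan by a frequency table over the distinct
-- characters followed by two aggregations (letters vs punctuation are disjoint).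

-- ===== PORT A =====
-- module-level punc_marks (one-char Python strings, represented as Char)
def punc_marks : List Char := ['!', ',', '\'', ';', '"', '.', '-', '?']

def count_letters_and_punctuation (line : String) : Int × Int :=
  line.toList.foldl
    (fun (acc : Int × Int) (char : Char) =>
      if PySem.Chars.isalpha char then (acc.1 + 1, acc.2)
      else if char ∈ punc_marks then (acc.1, acc.2 + 1)
      else acc)
    (0, 0)

-- ===== PORT B =====
-- the set PUNC_MARKS (distinct elements)
def puncSet : List Char := ['!', ',', '\'', ';', '"', '.', '-', '?']

def count_letters_and_punctuation_alt (line : String) : Int × Int :=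
  let freq : PySem.Dict Char Int :=
    line.toList.foldl (fun d ch => d.insert ch (d.getD ch 0 + 1)) PySem.Dict.empty
  let letters : Int :=
    (freq.items.filter (fun p => PySem.Chars.isalpha p.1)).foldl (fun s p => s + p.2) 0
  let punc : Int :=
    (freq.items.filter (fun p => decide (p.1 ∈ puncSet))).foldl (fun s p => s + p.2) 0
  (letters, punc)

-- ===== PRECONDITION & SPEC =====
def Spec_count_letters_and_punctuation (line : String) (out : Int × Int) : Prop := out = count_letters_and_punctuation_alt line
instance (line : String) (out : Int × Int) : Decidable (Spec_count_letters_and_punctuation line out) := by unfold Spec_count_letters_and_punctuation; infer_instance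

-- ===== CLAIM (what is proved, stated in full; the proofs are below) =====
def Claim_equal_count_letters_and_punctuation : Prop := ∀ (line : String), Dom_count_letters_and_punctuation line → Spec_count_letters_and_punctuation line (count_letters_and_punctuation line)

-- ===== LEMMAS AND PROOFS =====

-- A's loop computes the two countP's
lemma a_loop (cs : List Char) : ∀ (a b : Int),
    cs.foldl
      (fun (acc : Int × Int) (char : Char) =>
        if PySem.Chars.isalpha char then (acc.1 + 1, acc.2)
        else if char ∈ punc_marks then (acc.1, acc.2 + 1)
        else acc)
      (a, b)
    = (a + (cs.countP (fun c => PySem.Chars.isalpha c) : Int),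
       b + (cs.countP (fun c => !PySem.Chars.isalpha c && decide (c ∈ punc_marks)) : Int)) := by
  induction cs with
  | nil => simp
  | cons c cs ih =>
    intro a b
    simp only [List.foldl_cons, List.countP_cons]
    by_cases h : PySem.Chars.isalpha c = true
    · simp [h, ih]; ring
    · rw [Bool.not_eq_true] at h
      by_cases hm : c ∈ punc_marks
      · simp [h, hm, ih]; omega
      · simp [h, hm, ih]

lemma foldl_add_snd (l : List (Char × Int)) : ∀ (s : Int),
    l.foldl (fun s p => s + p.2) s = s + (l.map (·.2)).sum := by
  induction l with
  | nil => simp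
  | cons p l ih => intro s; simp [ih]; ring

lemma ofList_perm_dedup (cs : List Char) : List.Perm (PySem.Set.ofList cs) cs.dedup := by
  apply List.perm_of_nodup_nodup_toFinset_eq (PySem.Set.nodup_ofList cs) (List.nodup_dedup cs)
  ext x
  simp [List.mem_toFinset, PySem.Set.mem_ofList, List.mem_dedup]

-- sum of counts of the distinct characters satisfying q = countP q
lemma sum_counts (cs : List Char) (q : Char → Bool) :
    ((((PySem.Set.ofList cs).filter q).map (fun k => (cs.count k : Int)))).sum
      = (cs.countP q : Int) := by
  have hperm : List.Perm (((PySem.Set.ofList cs).filter q).map (fun k => (cs.count k : Int)))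
      ((cs.dedup.filter q).map (fun k => (cs.count k : Int))) :=
    (((ofList_perm_dedup cs).filter q).map _)
  rw [hperm.sum_eq]
  have := List.sum_map_count_dedup_filter_eq_countP q cs
  calc ((cs.dedup.filter q).map (fun k => (cs.count k : Int))).sum
      = (((cs.dedup.filter q).map (fun k => cs.count k)).sum : Int) := by
        rw [Nat.cast_list_sum]; simp [List.map_map, Function.comp_def]
    _ = (cs.countP q : Int) := by rw [this]

lemma punc_not_alpha (c : Char) (h : c ∈ puncSet) : PySem.Chars.isalpha c = false := by
  simp [puncSet] at h
  rcases h with h|h|h|h|h|h|h|h <;> subst h <;> decide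

lemma pred_eq : (fun c => !PySem.Chars.isalpha c && decide (c ∈ punc_marks))
    = (fun c => decide (c ∈ puncSet)) := by
  funext c
  by_cases h : c ∈ puncSet
  · simp [punc_not_alpha c h, h, show c ∈ punc_marks from h]
  · simp [h, show c ∉ punc_marks from h]

-- B's side computed
lemma b_side (cs : List Char) (q : Char → Bool) :
    (((PySem.Dict.counter cs).items.filter (fun p => q p.1)).foldl (fun s p => s + p.2) 0 : Int)
      = (cs.countP q : Int) := by
  rw [PySem.Dict.items_counter, List.filter_map, foldl_add_snd]
  simp only [List.map_map, Function.comp_def, zero_add]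
  exact sum_counts cs q

-- ===== VERDICT (by name: the statement is the Claim_ definition above) =====
theorem count_letters_and_punctuation_spec : Claim_equal_count_letters_and_punctuation := by
  intro line _
  unfold Spec_count_letters_and_punctuation
  simp only [count_letters_and_punctuation, count_letters_and_punctuation_alt,
    PySem.Dict.foldl_insert_getD_add_one_eq_counter, a_loop, b_side]
  rw [pred_eq, b_side line.toList (fun c => decide (c ∈ puncSet))]
  simp
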